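-- pv_equiv track=rewrite | github.com/kobso1245/Algorithms | week3/bandwidth_manager.py | create_heap1
-- ===== SOURCE A (Python) =====
-- def swap(elem1, elem2):
--     k = elem1
--     elem1 = elem2
--     elem2 = k
--     return (elem1, elem2)
--
-- def create_heap1(array):
--     resulted_array = []
--     last_element_index = 0
--     for elem in array:
--         resulted_array.append(elem)
--         heapify(resulted_array, last_element_index)
--         last_element_index += 1
--
--     return resulted_array
--
-- def heapify(resulted_array, last_element_index):
--     parrent_node = (last_element_index - 1)//2
--     while parrent_node >= 0:
--         if type(resulted_array[parrent_node]) is tuple: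
--             if resulted_array[parrent_node][0] < resulted_array[last_element_index][0]:
--                 resulted_array[parrent_node], resulted_array[last_element_index] = swap(resulted_array[parrent_node], resulted_array[last_element_index])
--                 last_element_index = parrent_node
--                 parrent_node = (parrent_node - 1)// 2
--             else:
--                 return
--         else:
--             if resulted_array[parrent_node] < resulted_array[last_element_index]:
--                 resulted_array[parrent_node], resulted_array[last_element_index] = swap(resulted_array[parrent_node], resulted_array[last_element_index])
--                 last_element_index = parrent_node
--                 parrent_node = (parrent_node - 1)// 2
--             else:
--                 return
--
--
--     return
-- ===== SOURCE B (Python) =====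
-- def ancestors(n):
--     # indices on the path from the root down to parent(n)
--     path = []
--     while n > 0:
--         n = (n - 1) // 2
--         path.append(n)
--     path.reverse()
--     return path
--
-- def create_heap1(array):
--     # Top-down insertion: instead of bubbling the new element up with repeated
--     # swaps, walk the root-to-parent ancestor path, find the first ancestor
--     # smaller than x (heap chains are non-increasing from the root, so this is
--     # where x belongs), and rotate the rest of the chain one level down.
--     heap = []
--     for x in array:
--         n = len(heap)
--         heap.append(x)
--         path = ancestors(n)
--         k = 0
--         while k < len(path) and heap[path[k]] >= x:
--             k += 1
--         carry = x
--         for j in path[k:]: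
--             heap[j], carry = carry, heap[j]
--         heap[n] = carry
--     return heap
-- ===== Notes on version B (the rewrite author's own statement) =====
-- stated objective: alternative
-- what changed: Replaces A's bottom-up swap loop (compare with parent, swap, climb) by a top-down pass: B precomputes the root-to-parent ancestor path, scans it from the root for the first ancestor smaller than the new element, and rotates the chain below that point one level down (single writes instead of pairwise swaps through a helper); correctness of the top-down order rests on the heap invariant, proved in the Lean file.
import Mathlib
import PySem

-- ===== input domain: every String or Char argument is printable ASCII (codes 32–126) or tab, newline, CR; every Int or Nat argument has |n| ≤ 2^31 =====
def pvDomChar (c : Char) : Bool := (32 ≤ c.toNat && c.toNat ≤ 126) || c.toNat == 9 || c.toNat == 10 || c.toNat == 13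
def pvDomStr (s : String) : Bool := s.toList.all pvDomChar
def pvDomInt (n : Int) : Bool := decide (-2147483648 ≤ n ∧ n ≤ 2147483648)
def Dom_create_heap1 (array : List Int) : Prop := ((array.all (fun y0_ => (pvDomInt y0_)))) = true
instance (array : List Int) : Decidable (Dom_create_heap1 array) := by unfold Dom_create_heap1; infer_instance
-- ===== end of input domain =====

-- B replaces A's bottom-up swap loop by a top-down pass: it scans the
-- root-to-parent ancestor path for the first ancestor smaller than the new
-- element and rotates the chain below it one level down (objective: alternative;
-- correctness of the top-down order rests on the heap invariant, proved below).
-- A mutates no caller-visible argument; equivalence is about the return value.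

-- ===== PORT A =====
-- helper 'swap(elem1, elem2)' returns (elem2, elem1)
def pySwap (elem1 elem2 : Int) : Int × Int := (elem2, elem1)

-- the while loop of 'heapify', with a structural fuel guard for totality only
-- (fuel ≥ parrent_node + 1 always holds at the call sites, so the 0-fuel branch
-- coincides with the loop's own exit: it returns the array unchanged).
-- Elements are Int, so the 'type(...) is tuple' test is statically False and only
-- its else-branch is live (ported as such). Python indices 'parrent_node' /
-- 'last_element_index' are always in range here, so List.getD with default 0 is exact.
def heapifyLoop (fuel : Nat) (resulted_array : List Int)
    (last_element_index parrent_node : Int) : List Int :=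
  match fuel with
  | 0 => resulted_array
  | fuel + 1 =>
    if 0 ≤ parrent_node then
      if resulted_array.getD parrent_node.toNat 0 <
          resulted_array.getD last_element_index.toNat 0 then
        let pr := pySwap (resulted_array.getD parrent_node.toNat 0)
                         (resulted_array.getD last_element_index.toNat 0)
        heapifyLoop fuel
          ((resulted_array.set parrent_node.toNat pr.1).set last_element_index.toNat pr.2)
          parrent_node (PySem.Int.floordiv (parrent_node - 1) 2)
      else resulted_array
    else resulted_array

def heapify (resulted_array : List Int) (last_element_index : Int) : List Int :=
  heapifyLoop last_element_index.toNat resulted_array last_element_index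
    (PySem.Int.floordiv (last_element_index - 1) 2)

def create_heap1 (array : List Int) : List Int :=
  (array.foldl
    (fun (st : List Int × Int) elem =>
      let resulted_array := st.1 ++ [elem]
      (heapify resulted_array st.2, st.2 + 1))
    (([] : List Int), (0 : Int))).1

-- ===== PORT B =====
-- 'ancestors(n)': collect parents bottom-up, then reverse (as Source B does)
def ancUp (n : Nat) : List Nat :=
  if n = 0 then [] else ((n - 1) / 2) :: ancUp ((n - 1) / 2)
decreasing_by exact Nat.lt_of_le_of_lt (Nat.div_le_self _ 2) (by omega)

-- the 'while k < len(path) and heap[path[k]] >= x: k += 1' scan, returning path[k:]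
def scanDrop (heap : List Int) (x : Int) : List Nat → List Nat
  | [] => []
  | j :: js => if x ≤ heap.getD j 0 then scanDrop heap x js else j :: js

-- the 'for j in path[k:]: heap[j], carry = carry, heap[j]' rotation
def rotate (heap : List Int) (carry : Int) : List Nat → List Int × Int
  | [] => (heap, carry)
  | j :: js => rotate (heap.set j carry) (heap.getD j 0) js

-- one iteration of Source B's outer loop (append x, scan the path, rotate, write carry)
def insertB (heap0 : List Int) (x : Int) : List Int :=
  let n := heap0.length
  let heap := heap0 ++ [x]
  let path := (ancUp n).reverse
  let suffix := scanDrop heap x path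
  let pr := rotate heap x suffix
  pr.1.set n pr.2

def create_heap1_alt (array : List Int) : List Int :=
  array.foldl insertB []

-- ===== PRECONDITION & SPEC =====
def Spec_create_heap1 (array : List Int) (out : List Int) : Prop := out = create_heap1_alt array
instance (array : List Int) (out : List Int) : Decidable (Spec_create_heap1 array out) := by unfold Spec_create_heap1; infer_instance

-- ===== CLAIM (what is proved, stated in full; the proofs are below) =====
def Claim_equal_create_heap1 : Prop := ∀ (array : List Int), Dom_create_heap1 array → Spec_create_heap1 array (create_heap1 array)

-- ===== LEMMAS AND PROOFS =====

-- the max-heap property (every non-root entry at most its parent)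
def HeapProp (arr : List Int) : Prop :=
  ∀ j : Nat, 0 < j → j < arr.length → arr.getD j 0 ≤ arr.getD ((j - 1) / 2) 0

-- heap property everywhere except on the edge into position n
def HeapExcept (arr : List Int) (n : Nat) : Prop :=
  ∀ j : Nat, 0 < j → j < arr.length → j ≠ n → arr.getD j 0 ≤ arr.getD ((j - 1) / 2) 0

-- children of n are bounded by n's parent
def Extra (arr : List Int) (n : Nat) : Prop :=
  ∀ c : Nat, 0 < c → c < arr.length → (c - 1) / 2 = n →
    arr.getD c 0 ≤ arr.getD ((n - 1) / 2) 0

lemma getD_set_self (l : List Int) (i : Nat) (v : Int) (h : i < l.length) :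
    (l.set i v).getD i 0 = v := by
  simp [List.getD, List.getElem?_set_self (by simpa using h)]

lemma getD_set_ne (l : List Int) (i j : Nat) (v : Int) (h : j ≠ i) :
    (l.set i v).getD j 0 = l.getD j 0 := by
  simp [List.getD, List.getElem?_set_ne (Ne.symm h)]

lemma set_getD_self (l : List Int) (j : Nat) (h : j < l.length) :
    l.set j (l.getD j 0) = l := by
  have : l.getD j 0 = l[j] := by simp [List.getD, List.getElem?_eq_getElem h]
  rw [this, List.set_getElem_self]

lemma mem_ancUp_lt : ∀ (n : Nat), ∀ j ∈ ancUp n, j < n := by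
  intro n
  induction n using Nat.strong_induction_on with
  | _ n ih =>
    intro j hj
    rw [ancUp] at hj
    by_cases h0 : n = 0
    · simp [h0] at hj
    · rw [if_neg h0] at hj
      have hlt : (n - 1) / 2 < n := Nat.lt_of_le_of_lt (Nat.div_le_self _ 2) (by omega)
      rcases List.mem_cons.mp hj with h | h
      · omega
      · exact lt_trans (ih _ hlt j h) hlt

lemma ancUp_pos (n : Nat) (h : 0 < n) :
    ancUp n = ((n - 1) / 2) :: ancUp ((n - 1) / 2) := by
  rw [ancUp, if_neg (by omega)]

-- along the ancestor path of n, all values dominate arr[(n-1)/2]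
lemma chain_ge : ∀ (n : Nat) (arr : List Int) (m : Nat), HeapExcept arr m → n ≤ m →
    n < arr.length → 0 < n →
    ∀ j ∈ (ancUp n).reverse, arr.getD ((n - 1) / 2) 0 ≤ arr.getD j 0 := by
  intro n
  induction n using Nat.strong_induction_on with
  | _ n ih =>
    intro arr m hHE hnm hlen hpos j hj
    rw [ancUp_pos n hpos] at hj
    simp only [List.reverse_cons, List.mem_append, List.mem_singleton] at hj
    rcases hj with hj | hj
    · -- j among ancestors of p
      set p := (n - 1) / 2 with hp
      have hppos : 0 < p := by
        by_contra h
        have : p = 0 := by omega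
        rw [this] at hj; simp [ancUp] at hj
      have hplt : p < n := Nat.lt_of_le_of_lt (Nat.div_le_self _ 2) (by omega)
      have h1 : arr.getD ((p - 1) / 2) 0 ≤ arr.getD j 0 :=
        ih p hplt arr m hHE (by omega) (by omega) hppos j hj
      have h2 : arr.getD p 0 ≤ arr.getD ((p - 1) / 2) 0 :=
        hHE p hppos (by omega) (by omega)
      exact le_trans h2 h1
    · rw [hj]

lemma scanDrop_all (heap : List Int) (x : Int) :
    ∀ l : List Nat, (∀ j ∈ l, x ≤ heap.getD j 0) → scanDrop heap x l = [] := by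
  intro l h
  induction l with
  | nil => rfl
  | cons j js ih =>
    rw [scanDrop, if_pos (h j (List.mem_cons_self))]
    exact ih (fun k hk => h k (List.mem_cons_of_mem _ hk))

lemma scanDrop_append (heap : List Int) (x : Int) (l1 l2 : List Nat) :
    scanDrop heap x (l1 ++ l2) =
      if scanDrop heap x l1 = [] then scanDrop heap x l2
      else scanDrop heap x l1 ++ l2 := by
  induction l1 with
  | nil => simp [scanDrop]
  | cons j js ih =>
    simp only [List.cons_append, scanDrop]
    split
    · exact ih
    · simp

lemma scanDrop_congr (h h' : List Int) (x : Int) :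
    ∀ l : List Nat, (∀ j ∈ l, h.getD j 0 = h'.getD j 0) →
      scanDrop h x l = scanDrop h' x l := by
  intro l he
  induction l with
  | nil => rfl
  | cons j js ih =>
    rw [scanDrop, scanDrop, he j (List.mem_cons_self)]
    split
    · exact ih (fun k hk => he k (List.mem_cons_of_mem _ hk))
    · rfl

lemma scanDrop_sublist (heap : List Int) (x : Int) :
    ∀ l : List Nat, ∀ j ∈ scanDrop heap x l, j ∈ l := by
  intro l
  induction l with
  | nil => intro j hj; simp [scanDrop] at hj
  | cons a as ih =>
    intro j hj
    rw [scanDrop] at hj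
    by_cases hc : x ≤ heap.getD a 0
    · rw [if_pos hc] at hj; exact List.mem_cons_of_mem _ (ih j hj)
    · rw [if_neg hc] at hj; exact hj

lemma rotate_append (heap : List Int) (carry : Int) (l1 l2 : List Nat) :
    rotate heap carry (l1 ++ l2) =
      rotate (rotate heap carry l1).1 (rotate heap carry l1).2 l2 := by
  induction l1 generalizing heap carry with
  | nil => rfl
  | cons j js ih => simp only [List.cons_append, rotate]; exact ih _ _

lemma rotate_getD_notmem :
    ∀ (l : List Nat) (heap : List Int) (carry : Int) (i : Nat), i ∉ l →
      (rotate heap carry l).1.getD i 0 = heap.getD i 0 := by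
  intro l
  induction l with
  | nil => intro heap carry i h; rfl
  | cons j js ih =>
    intro heap carry i h
    rw [rotate]
    rw [ih _ _ _ (fun hm => h (List.mem_cons_of_mem _ hm))]
    exact getD_set_ne _ _ _ _ (fun he => h (he ▸ List.mem_cons_self))

lemma rotate_set_notmem :
    ∀ (l : List Nat) (heap : List Int) (carry v : Int) (i : Nat), i ∉ l →
      rotate (heap.set i v) carry l =
        (((rotate heap carry l).1.set i v), (rotate heap carry l).2) := by
  intro l
  induction l with
  | nil => intro heap carry v i h; rfl
  | cons j js ih =>
    intro heap carry v i h
    have hij : i ≠ j := fun he => h (he ▸ List.mem_cons_self)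
    rw [rotate, rotate, getD_set_ne _ _ _ _ (Ne.symm hij), List.set_comm _ _ hij]
    exact ih _ _ _ _ (fun hm => h (List.mem_cons_of_mem _ hm))

-- the per-insertion equivalence: A's bottom-up swap loop equals B's
-- scan-and-rotate, and the result is a heap
lemma heapify_eq_top (F : Nat) : ∀ (n : Nat) (arr : List Int) (x : Int),
    n ≤ F → n < arr.length → arr.getD n 0 = x → HeapExcept arr n → Extra arr n →
    heapifyLoop F arr (n : Int) (PySem.Int.floordiv ((n : Int) - 1) 2)
        = (rotate arr x (scanDrop arr x (ancUp n).reverse)).1.set n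
            (rotate arr x (scanDrop arr x (ancUp n).reverse)).2 ∧
      HeapProp (heapifyLoop F arr (n : Int) (PySem.Int.floordiv ((n : Int) - 1) 2)) := by
  induction F with
  | zero =>
    intro n arr x hF hlen hx hHE _
    have h0 : n = 0 := by omega
    subst h0
    refine ⟨?_, ?_⟩
    · rw [heapifyLoop, ancUp, if_pos rfl]
      simp only [List.reverse_nil, scanDrop, rotate]
      rw [← hx, set_getD_self arr 0 hlen]
    · intro j hj hjl
      exact hHE j hj hjl (by omega)
  | succ F ih =>
    intro n arr x hF hlen hx hHE hEx
    by_cases h0 : n = 0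
    · subst h0
      simp only [Nat.cast_zero]
      refine ⟨?_, ?_⟩
      · rw [heapifyLoop, if_neg (by decide : ¬ (0 : Int) ≤ PySem.Int.floordiv (0 - 1) 2)]
        rw [ancUp, if_pos rfl]
        simp only [List.reverse_nil, scanDrop, rotate]
        rw [← hx, set_getD_self arr 0 hlen]
      · rw [heapifyLoop, if_neg (by decide : ¬ (0 : Int) ≤ PySem.Int.floordiv (0 - 1) 2)]
        intro j hj hjl
        exact hHE j hj hjl (by omega)
    · set p := (n - 1) / 2 with hp
      have hpn : p < n := by omega
      have hpl : p < arr.length := by omega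
      have hcast : PySem.Int.floordiv ((n : Int) - 1) 2 = (p : Int) := by
        have h1 : ((n : Int) - 1) = ((n - 1 : Nat) : Int) := by omega
        rw [h1]
        exact_mod_cast PySem.Int.floordiv_natCast (n - 1) 2
      rw [hcast]
      have hpath : (ancUp n).reverse = (ancUp p).reverse ++ [p] := by
        rw [ancUp_pos n (by omega), ← hp]
        simp
      by_cases hc : arr.getD p 0 < x
      · -- swap case
        set arr' := (arr.set p x).set n (arr.getD p 0) with harr'
        have hA : heapifyLoop (F + 1) arr (n : Int) (p : Int)
            = heapifyLoop F arr' (p : Int) (PySem.Int.floordiv ((p : Int) - 1) 2) := by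
          rw [heapifyLoop, if_pos (by positivity : (0 : Int) ≤ (p : Int))]
          simp only [Int.toNat_natCast, pySwap, hx]
          rw [if_pos hc]
        rw [hA]
        -- facts about arr'
        have hlen' : arr'.length = arr.length := by simp [harr']
        have g1 : arr'.getD n 0 = arr.getD p 0 :=
          getD_set_self _ n _ (by simpa using hlen)
        have g2 : arr'.getD p 0 = x := by
          rw [harr', getD_set_ne _ _ _ _ (by omega), getD_set_self _ p _ hpl]
        have g3 : ∀ j : Nat, j ≠ p → j ≠ n → arr'.getD j 0 = arr.getD j 0 := by
          intro j h1 h2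
          rw [harr', getD_set_ne _ _ _ _ h2, getD_set_ne _ _ _ _ h1]
        have hHE' : HeapExcept arr' p := by
          intro j hj hjl hjp
          rw [hlen'] at hjl
          by_cases hj1 : j = n
          · subst hj1
            rw [g1, (by omega : (j - 1) / 2 = p), g2]
            exact le_of_lt hc
          · by_cases hj2 : (j - 1) / 2 = n
            · have hjne : (j - 1) / 2 ≠ p := by omega
              rw [g3 j hjp hj1, hj2, g1]
              exact hEx j hj hjl hj2
            · by_cases hj3 : (j - 1) / 2 = p
              · rw [g3 j hjp hj1, hj3, g2]
                exact le_of_lt (lt_of_le_of_lt (hHE j hj hjl hj1) (hj3 ▸ hc))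
              · rw [g3 j hjp hj1, g3 _ hj3 hj2]
                exact hHE j hj hjl hj1
        have hEx' : Extra arr' p := by
          intro c hc0 hcl hcp
          rw [hlen'] at hcl
          have hcne : c ≠ p := by omega
          by_cases hp0 : p = 0
          · have hg : (p - 1) / 2 = p := by omega
            rw [hg, g2]
            by_cases hcn : c = n
            · subst hcn; rw [g1]; exact le_of_lt hc
            · rw [g3 c hcne hcn]
              exact le_of_lt (lt_of_le_of_lt (hHE c hc0 hcl hcn) (hcp ▸ hc))
          · have hgp : (p - 1) / 2 ≠ p := by omega
            have hgn : (p - 1) / 2 ≠ n := by omega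
            rw [g3 _ hgp hgn]
            by_cases hcn : c = n
            · subst hcn
              rw [g1]
              exact hHE p (by omega) hpl (by omega)
            · rw [g3 c hcne hcn]
              exact le_trans (hcp ▸ hHE c hc0 hcl hcn)
                (hHE p (by omega) hpl (by omega))
        obtain ⟨hEq, hHeap⟩ := ih p arr' x (by omega) (by omega) g2 hHE' hEx'
        refine ⟨?_, hHeap⟩
        rw [hEq, hpath]
        -- relate B's computation at n on arr with B's computation at p on arr'
        set S := scanDrop arr x (ancUp p).reverse with hS
        have hSmem : ∀ j ∈ S, j < p := by
          intro j hj
          have := scanDrop_sublist arr x _ j hj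
          rw [List.mem_reverse] at this
          exact mem_ancUp_lt p j this
        have hpS : p ∉ S := fun h => absurd (hSmem p h) (lt_irrefl p)
        have hnS : n ∉ S := fun h => absurd (hSmem n h) (by omega)
        have hS' : scanDrop arr' x (ancUp p).reverse = S := by
          apply scanDrop_congr
          intro j hj
          rw [List.mem_reverse] at hj
          have hjp := mem_ancUp_lt p j hj
          exact g3 j (by omega) (by omega)
        rw [hS']
        rw [scanDrop_append]
        have hpstep : scanDrop arr x [p] = [p] := by
          rw [scanDrop, if_neg (not_le.mpr hc)]
        by_cases hSnil : S = []
        · rw [if_pos hSnil, hSnil, hpstep]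
          simp only [rotate]
          have hfix : arr'.set p x = arr' := by
            rw [← g2]
            exact set_getD_self arr' p (by omega)
          rw [hfix]
        · rw [if_neg hSnil]
          rw [rotate_append, rotate_set_notmem _ _ _ _ _ hnS,
            rotate_set_notmem _ _ _ _ _ hpS]
          simp only [rotate]
          rw [rotate_getD_notmem _ _ _ _ hpS]
          rw [List.set_comm _ _ (by omega : p ≠ n), List.set_set, ← hS]
          exact List.set_comm _ _ (by omega : n ≠ p)
      · -- stop case: A leaves the array unchanged
        have hA : heapifyLoop (F + 1) arr (n : Int) (p : Int) = arr := by
          rw [heapifyLoop, if_pos (by positivity : (0 : Int) ≤ (p : Int))]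
          simp only [Int.toNat_natCast, hx]
          rw [if_neg hc]
        rw [hA]
        refine ⟨?_, ?_⟩
        · have hall : ∀ j ∈ (ancUp n).reverse, x ≤ arr.getD j 0 := by
            intro j hj
            exact le_trans (not_lt.mp hc)
              (chain_ge n arr n hHE le_rfl hlen (by omega) j hj)
          rw [scanDrop_all arr x _ hall]
          simp only [rotate]
          rw [← hx, set_getD_self arr n hlen]
        · intro j hj hjl
          by_cases hjn : j = n
          · subst hjn
            rw [hx, (by omega : (j - 1) / 2 = p)]
            exact not_lt.mp hc
          · exact hHE j hj hjl hjn

lemma rotate_length : ∀ (l : List Nat) (heap : List Int) (carry : Int),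
    (rotate heap carry l).1.length = heap.length := by
  intro l
  induction l with
  | nil => intro heap carry; rfl
  | cons j js ih => intro heap carry; rw [rotate, ih]; simp

lemma insertB_length (heap : List Int) (x : Int) :
    (insertB heap x).length = heap.length + 1 := by
  simp [insertB, rotate_length]

lemma getD_append_lt (l : List Int) (x : Int) (j : Nat) (h : j < l.length) :
    (l ++ [x]).getD j 0 = l.getD j 0 := by
  simp [List.getD, List.getElem?_append_left h]

lemma getD_append_last (l : List Int) (x : Int) :
    (l ++ [x]).getD l.length 0 = x := by
  simp [List.getD]

lemma fold_eq (array : List Int) : ∀ (heap : List Int), HeapProp heap →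
    (array.foldl
      (fun (st : List Int × Int) elem =>
        let resulted_array := st.1 ++ [elem]
        (heapify resulted_array st.2, st.2 + 1))
      (heap, (heap.length : Int))).1
    = array.foldl insertB heap := by
  induction array with
  | nil => intro heap _; rfl
  | cons a tl ih =>
    intro heap hH
    simp only [List.foldl_cons]
    set n := heap.length with hn
    have hHE : HeapExcept (heap ++ [a]) n := by
      intro j hj hjl hjn
      have hjn' : j < n := by simp at hjl; omega
      have hpar : (j - 1) / 2 < n := by omega
      rw [getD_append_lt _ _ _ hjn', getD_append_lt _ _ _ hpar]
      exact hH j hj hjn'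
    have hEx : Extra (heap ++ [a]) n := by
      intro c hc hcl hcn
      exfalso
      simp at hcl
      omega
    have key := heapify_eq_top n n (heap ++ [a]) a (by omega) (by simp [hn])
      (getD_append_last heap a) hHE hEx
    have hstep : heapify (heap ++ [a]) (n : Int)
        = heapifyLoop n (heap ++ [a]) (n : Int) (PySem.Int.floordiv ((n : Int) - 1) 2) := by
      unfold heapify
      rw [Int.toNat_natCast]
    have hB : heapify (heap ++ [a]) (n : Int) = insertB heap a := by
      rw [hstep, key.1]; rfl
    have hHP : HeapProp (insertB heap a) := by
      rw [← hB, hstep]; exact key.2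
    have hcnt : (n : Int) + 1 = ((insertB heap a).length : Int) := by
      rw [insertB_length]; push_cast; ring
    rw [hB, hcnt]
    exact ih (insertB heap a) hHP

-- ===== VERDICT (by name: the statement is the Claim_ definition above) =====
theorem create_heap1_spec : Claim_equal_create_heap1 := by
  intro array _
  unfold Spec_create_heap1 create_heap1 create_heap1_alt
  simpa using fold_eq array [] (by intro j hj hl; simp at hl)
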